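-- pv_equiv track=rewrite | github.com/karankumarnayakwork-cpu/IIIT_Hackathon_prorject | Upside down theories/backend/slide_planner.py | parse_slides
-- ===== SOURCE A (Python) =====
-- def parse_slides(slide_text):
--
--     slides = {}
--     lines = slide_text.split("\n")
--
--     current_title = None
--     points = []
--
--     for line in lines:
--
--         line = line.strip()
--
--         # Detect slide titles
--         if line.lower().startswith("slide"):
--
--             if current_title:
--                 slides[current_title] = points
--
--             current_title = line
--             points = []
--
--         # Detect bullet points
--         elif line.startswith("-"):
--
--             points.append(line.replace("-", "").strip())
--
--     if current_title:
--         slides[current_title] = points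
--
--     return slides
-- ===== SOURCE B (Python) =====
-- def parse_slides(slide_text):
--     # Index-and-slice decomposition: strip all lines once, then repeatedly scan
--     # forward to the next title and slice out that title's block.
--     def is_title(ln):
--         return ln.lower().startswith("slide")
--
--     lines = [ln.strip() for ln in slide_text.split("\n")]
--     slides = {}
--     k = 0
--     while k < len(lines) and not is_title(lines[k]):
--         k += 1
--     while k < len(lines):
--         title = lines[k]
--         j = k + 1
--         while j < len(lines) and not is_title(lines[j]):
--             j += 1
--         slides[title] = [ln.replace("-", "").strip()
--                         for ln in lines[k + 1:j] if ln.startswith("-")]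
--         k = j
--     return slides
-- ===== Notes on version B (the rewrite author's own statement) =====
-- stated objective: alternative
-- what changed: Replaces A's single-pass state machine (current_title/points accumulator with a final flush) by an index-and-slice decomposition: strip all lines once, skip the preamble, then repeatedly scan to the next title and slice out that title's bullet block.
import Mathlib
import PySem

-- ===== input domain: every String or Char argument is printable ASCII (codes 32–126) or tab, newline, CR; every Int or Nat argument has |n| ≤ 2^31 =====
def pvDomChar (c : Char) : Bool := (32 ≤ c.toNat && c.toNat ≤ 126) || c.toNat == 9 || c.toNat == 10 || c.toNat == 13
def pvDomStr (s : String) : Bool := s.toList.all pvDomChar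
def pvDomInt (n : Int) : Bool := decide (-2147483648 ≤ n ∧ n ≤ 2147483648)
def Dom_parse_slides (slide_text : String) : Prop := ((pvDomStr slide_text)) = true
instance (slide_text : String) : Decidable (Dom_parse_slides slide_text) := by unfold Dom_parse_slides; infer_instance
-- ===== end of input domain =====

-- B replaces A's single-pass state machine (current title + points accumulator + final flush)
-- by a block decomposition: skip the preamble, then repeatedly take a title and slice out its block.

-- shared line predicates (used by both ports, as in both Pythons)
def pvIsTitle (ln : String) : Bool := PySem.Str.startswith (PySem.Str.lower ln) "slide"
def pvClean (ln : String) : String := PySem.Str.strip (PySem.Str.replace ln "-" "")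

-- ===== PORT A =====
def pvStepA (st : PySem.Dict String (List String) × Option String × List String)
    (rawline : String) : PySem.Dict String (List String) × Option String × List String :=
  let line := PySem.Str.strip rawline
  if pvIsTitle line then
    match st.2.1 with
    | some t => (st.1.insert t st.2.2, some line, [])
    | none => (st.1, some line, [])
  else if PySem.Str.startswith line "-" then
    (st.1, st.2.1, st.2.2 ++ [pvClean line])
  else st

def parse_slides (slide_text : String) : List (String × List String) :=
  let lines := (PySem.Str.split? slide_text "\n").getD []
  let st := lines.foldl pvStepA (PySem.Dict.empty, none, [])
  (match st.2.1 with
   | some t => st.1.insert t st.2.2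
   | none => st.1).items

-- ===== PORT B =====
def pvAltLoop (d : PySem.Dict String (List String)) :
    List String → PySem.Dict String (List String)
  | [] => d
  | t :: rest =>
    -- scan forward to the next title (B's inner while), slice out the block
    let block := rest.takeWhile (fun l => !pvIsTitle l)
    pvAltLoop (d.insert t ((block.filter (fun l => PySem.Str.startswith l "-")).map pvClean))
      (rest.dropWhile (fun l => !pvIsTitle l))
  termination_by ls => ls.length
  decreasing_by
    have := List.length_dropWhile_le (fun l => !pvIsTitle l) rest
    simp; omega

def parse_slides_alt (slide_text : String) : List (String × List String) :=
  let lines := ((PySem.Str.split? slide_text "\n").getD []).map PySem.Str.strip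
  (pvAltLoop PySem.Dict.empty (lines.dropWhile (fun l => !pvIsTitle l))).items

-- ===== PRECONDITION & SPEC =====
def Spec_parse_slides (slide_text : String) (out : List (String × List String)) : Prop := out = parse_slides_alt slide_text
instance (slide_text : String) (out : List (String × List String)) : Decidable (Spec_parse_slides slide_text out) := by unfold Spec_parse_slides; infer_instance

-- ===== CLAIM (what is proved, stated in full; the proofs are below) =====
def Claim_equal_parse_slides : Prop := ∀ (slide_text : String), Dom_parse_slides slide_text → Spec_parse_slides slide_text (parse_slides slide_text)

-- ===== LEMMAS AND PROOFS =====

-- A's step on the already-stripped line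
def pvStepS (st : PySem.Dict String (List String) × Option String × List String)
    (line : String) : PySem.Dict String (List String) × Option String × List String :=
  if pvIsTitle line then
    match st.2.1 with
    | some t => (st.1.insert t st.2.2, some line, [])
    | none => (st.1, some line, [])
  else if PySem.Str.startswith line "-" then
    (st.1, st.2.1, st.2.2 ++ [pvClean line])
  else st

lemma pvStepA_eq (st : PySem.Dict String (List String) × Option String × List String)
    (raw : String) : pvStepA st raw = pvStepS st (PySem.Str.strip raw) := rfl

-- A's final flush
def pvFinish (st : PySem.Dict String (List String) × Option String × List String) :
    PySem.Dict String (List String) :=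
  match st.2.1 with
  | some t => st.1.insert t st.2.2
  | none => st.1

def pvBullets (ls : List String) : List String :=
  ((ls.takeWhile (fun l => !pvIsTitle l)).filter (fun l => PySem.Str.startswith l "-")).map pvClean

lemma pvAltLoop_cons (d : PySem.Dict String (List String)) (t : String)
    (rest : List String) :
    pvAltLoop d (t :: rest) =
      pvAltLoop
        (d.insert t
          (((rest.takeWhile (fun l => !pvIsTitle l)).filter
            (fun l => PySem.Str.startswith l "-")).map pvClean))
        (rest.dropWhile (fun l => !pvIsTitle l)) := by
  rw [pvAltLoop]

lemma pvMain (ls : List String) :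
    ∀ (d : PySem.Dict String (List String)) (cur : Option String) (pts : List String),
      pvFinish (ls.foldl pvStepS (d, cur, pts)) =
        match cur with
        | none => pvAltLoop d (ls.dropWhile (fun l => !pvIsTitle l))
        | some t => pvAltLoop (d.insert t (pts ++ pvBullets ls)) (ls.dropWhile (fun l => !pvIsTitle l)) := by
  induction ls with
  | nil =>
    intro d cur pts
    cases cur <;> simp [pvFinish, pvAltLoop, pvBullets]
  | cons l rest ih =>
    intro d cur pts
    by_cases ht : pvIsTitle l
    · cases cur <;>
        simp [List.foldl_cons, pvStepS, ht, ih, List.dropWhile_cons, List.takeWhile_cons,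
          pvAltLoop_cons, pvBullets]
    · by_cases hb : PySem.Str.startswith l "-"
      · have hb2 : PySem.Chars.startswith l.toList ['-'] = true := by simpa using hb
        cases cur <;>
          simp [List.foldl_cons, pvStepS, ht, hb, hb2, ih, List.dropWhile_cons,
            List.takeWhile_cons, List.filter_cons, pvBullets]
      · have hb2 : PySem.Chars.startswith l.toList ['-'] = false := by
          simpa using hb
        cases cur <;>
          simp [List.foldl_cons, pvStepS, ht, hb, hb2, ih, List.dropWhile_cons,
            List.takeWhile_cons, List.filter_cons, pvBullets]

-- ===== VERDICT (by name: the statement is the Claim_ definition above) =====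
theorem parse_slides_spec : Claim_equal_parse_slides := by
  intro slide_text _
  have key : ∀ raws : List String,
      pvFinish (raws.foldl pvStepA (PySem.Dict.empty, none, [])) =
        pvAltLoop PySem.Dict.empty
          ((raws.map PySem.Str.strip).dropWhile (fun l => !pvIsTitle l)) := by
    intro raws
    have hmap : (raws.map PySem.Str.strip).foldl pvStepS (PySem.Dict.empty, none, []) =
        raws.foldl pvStepA (PySem.Dict.empty, none, []) := by
      rw [List.foldl_map]
      have hfun : (fun st raw => pvStepS st (PySem.Str.strip raw)) = pvStepA := by
        funext st raw
        rw [pvStepA_eq]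
      rw [hfun]
    rw [← hmap, pvMain]
  have h := congrArg PySem.Dict.items
    (key ((PySem.Str.split? slide_text "\n").getD []))
  simpa [Spec_parse_slides, parse_slides, parse_slides_alt, pvFinish] using h
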